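-- pv_equiv track=rewrite | github.com/Tripleler/CodeTest | Python/programmers/Lv1/lv1_모의고사.py | solution
-- ===== SOURCE A (Python) =====
-- def solution(answers):
--     stu1=[]
--     stu2=[]
--     stu3=[]
--     answer=[0,0,0]
--     answer2=[]
--     for i in range(len(answers)):
--         if i%5==0:
--             stu1.append(1)
--         elif i%5==1:
--             stu1.append(2)
--         elif i%5==2:
--             stu1.append(3)
--         elif i%5==3:
--             stu1.append(4)
--         else:
--             stu1.append(5)
--     for i in range(len(answers)):
--         if i%2==0:
--             stu2.append(2)
--         elif i%8==1:
--             stu2.append(1)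
--         elif i%8==3:
--             stu2.append(3)
--         elif i%8==5:
--             stu2.append(4)
--         else:
--             stu2.append(5)
--     for i in range(len(answers)):
--         if (i%10==0)|(i%10==1):
--             stu3.append(3)
--         elif (i%10==2)|(i%10==3):
--             stu3.append(1)
--         elif (i%10==4)|(i%10==5):
--             stu3.append(2)
--         elif (i%10==6)|(i%10==7):
--             stu3.append(4)
--         else:
--             stu3.append(5)
--     for i in range(len(answers)):
--         if answers[i]==stu1[i]:
--             answer[0]+=1
--         if answers[i]==stu2[i]:
--             answer[1]+=1
--         if answers[i]==stu3[i]: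
--             answer[2]+=1
--     if answer[0]==max(answer):
--         answer2.append(1)
--     if answer[1]==max(answer):
--         answer2.append(2)
--     if answer[2]==max(answer):
--         answer2.append(3)
--     return answer2
-- ===== SOURCE B (Python) =====
-- def solution(answers):
--     # One pass builds a frequency table keyed by (index mod 40, answer); 40 = lcm of the
--     # three pattern periods, so each student's score is then read off the 40-entry table
--     # without scanning answers again.
--     cnt = {}
--     for i, a in enumerate(answers):
--         key = (i % 40, a)
--         cnt[key] = cnt.get(key, 0) + 1
--     patterns = [[1, 2, 3, 4, 5], [2, 1, 2, 3, 2, 4, 2, 5], [3, 3, 1, 1, 2, 2, 4, 4, 5, 5]]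
--     scores = [sum(cnt.get((r, p[r % len(p)]), 0) for r in range(40)) for p in patterns]
--     m = max(scores)
--     return [s + 1 for s in range(3) if scores[s] == m]
-- ===== Notes on version B (the rewrite author's own statement) =====
-- stated objective: alternative
-- what changed: B replaces A's four per-element passes (three pattern-list-building loops plus a comparison loop) by one pass that builds a frequency table keyed by (index mod 40, answer) — 40 being the lcm of the three pattern periods — after which each student's score is read off the 40-entry table without touching answers again.
import Mathlib
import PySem

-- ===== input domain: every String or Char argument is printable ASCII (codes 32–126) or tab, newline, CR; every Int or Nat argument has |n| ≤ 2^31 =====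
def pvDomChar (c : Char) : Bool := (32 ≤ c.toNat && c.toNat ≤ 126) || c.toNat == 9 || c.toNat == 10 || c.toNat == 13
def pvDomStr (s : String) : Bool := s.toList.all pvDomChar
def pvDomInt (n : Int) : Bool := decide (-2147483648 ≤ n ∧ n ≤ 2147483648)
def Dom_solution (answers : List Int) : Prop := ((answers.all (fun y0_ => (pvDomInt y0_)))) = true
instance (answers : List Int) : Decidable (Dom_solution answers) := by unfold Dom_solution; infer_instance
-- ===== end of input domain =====

-- B replaces A's four per-element passes by one pass building a frequency table keyed by
-- (index mod 40, answer) — 40 = lcm of the pattern periods — from which the three scores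
-- are read off without rescanning the input (objective: alternative).

-- ===== PORT A =====
-- A-side helpers: the per-iteration branch chains of the three stu-building loops
def pvF1 (i : Int) : Int :=
  if PySem.Int.mod i 5 = 0 then 1
  else if PySem.Int.mod i 5 = 1 then 2
  else if PySem.Int.mod i 5 = 2 then 3
  else if PySem.Int.mod i 5 = 3 then 4
  else 5

def pvF2 (i : Int) : Int :=
  if PySem.Int.mod i 2 = 0 then 2
  else if PySem.Int.mod i 8 = 1 then 1
  else if PySem.Int.mod i 8 = 3 then 3
  else if PySem.Int.mod i 8 = 5 then 4
  else 5

def pvF3 (i : Int) : Int :=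
  if PySem.Int.mod i 10 = 0 ∨ PySem.Int.mod i 10 = 1 then 3
  else if PySem.Int.mod i 10 = 2 ∨ PySem.Int.mod i 10 = 3 then 1
  else if PySem.Int.mod i 10 = 4 ∨ PySem.Int.mod i 10 = 5 then 2
  else if PySem.Int.mod i 10 = 6 ∨ PySem.Int.mod i 10 = 7 then 4
  else 5

def solution (answers : List Int) : List Int :=
  let n : Int := (answers.length : Int)
  let stu1 := (PySem.List.pyRange 0 n 1).foldl (fun acc i => acc ++ [pvF1 i]) []
  let stu2 := (PySem.List.pyRange 0 n 1).foldl (fun acc i => acc ++ [pvF2 i]) []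
  let stu3 := (PySem.List.pyRange 0 n 1).foldl (fun acc i => acc ++ [pvF3 i]) []
  let answer := (PySem.List.pyRange 0 n 1).foldl (fun (s : Int × Int × Int) i =>
    (if PySem.List.pyGetD answers i 0 = PySem.List.pyGetD stu1 i 0 then s.1 + 1 else s.1,
     if PySem.List.pyGetD answers i 0 = PySem.List.pyGetD stu2 i 0 then s.2.1 + 1 else s.2.1,
     if PySem.List.pyGetD answers i 0 = PySem.List.pyGetD stu3 i 0 then s.2.2 + 1 else s.2.2))
    (0, 0, 0)
  let m := (PySem.List.max? [answer.1, answer.2.1, answer.2.2] (fun y => y)).getD 0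
  (if answer.1 = m then [1] else []) ++
  (if answer.2.1 = m then [2] else []) ++
  (if answer.2.2 = m then [3] else [])

-- ===== PORT B =====
def pvPats : List (List Int) := [[1, 2, 3, 4, 5], [2, 1, 2, 3, 2, 4, 2, 5], [3, 3, 1, 1, 2, 2, 4, 4, 5, 5]]

def solution_alt (answers : List Int) : List Int :=
  let cnt : PySem.Dict (Int × Int) Int :=
    (PySem.List.enumerate answers 0).foldl
      (fun d x => d.insert (PySem.Int.mod x.1 40, x.2) (d.getD (PySem.Int.mod x.1 40, x.2) 0 + 1))
      PySem.Dict.empty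
  let scores := pvPats.map (fun p =>
    ((PySem.List.pyRange 0 40 1).map
      (fun r => cnt.getD (r, PySem.List.pyGetD p (PySem.Int.mod r ((p.length : Nat) : Int)) 0) 0)).sum)
  let m := (PySem.List.max? scores (fun y => y)).getD 0
  ((PySem.List.pyRange 0 3 1).filter (fun s => PySem.List.pyGetD scores s 0 == m)).map (fun s => s + 1)

-- ===== PRECONDITION & SPEC =====
def Spec_solution (answers : List Int) (out : List Int) : Prop := out = solution_alt answers
instance (answers : List Int) (out : List Int) : Decidable (Spec_solution answers out) := by unfold Spec_solution; infer_instance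

-- ===== CLAIM (what is proved, stated in full; the proofs are below) =====
def Claim_equal_solution : Prop := ∀ (answers : List Int), Dom_solution answers → Spec_solution answers (solution answers)

-- ===== LEMMAS AND PROOFS =====

-- table lookups at reduced residue = A's branch chains
lemma pvG1 (i : Nat) : PySem.List.pyGetD [1, 2, 3, 4, 5] (PySem.Int.mod (PySem.Int.mod ((i : Nat) : Int) 40) 5) 0 = pvF1 (i : Int) := by
  have h : i % 5 < 5 := Nat.mod_lt _ (by norm_num)
  have e : PySem.Int.mod (PySem.Int.mod ((i : Nat) : Int) 40) 5 = ((i % 5 : Nat) : Int) := by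
    rw [PySem.Int.mod_eq_emod_of_pos (b := 40) (by norm_num), PySem.Int.mod_eq_emod_of_pos (by norm_num)]
    omega
  have e5 : PySem.Int.mod ((i : Nat) : Int) 5 = ((i % 5 : Nat) : Int) := by
    rw [PySem.Int.mod_eq_emod_of_pos (by norm_num)]; omega
  unfold pvF1
  rw [e, e5, PySem.List.pyGetD_natCast]
  generalize i % 5 = r at *
  interval_cases r <;> norm_num

lemma pvG2 (i : Nat) : PySem.List.pyGetD [2, 1, 2, 3, 2, 4, 2, 5] (PySem.Int.mod (PySem.Int.mod ((i : Nat) : Int) 40) 8) 0 = pvF2 (i : Int) := by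
  have h : i % 8 < 8 := Nat.mod_lt _ (by norm_num)
  have h2 : i % 2 = i % 8 % 2 := (Nat.mod_mod_of_dvd i ⟨4, rfl⟩).symm
  have e : PySem.Int.mod (PySem.Int.mod ((i : Nat) : Int) 40) 8 = ((i % 8 : Nat) : Int) := by
    rw [PySem.Int.mod_eq_emod_of_pos (b := 40) (by norm_num), PySem.Int.mod_eq_emod_of_pos (by norm_num)]
    omega
  have e2 : PySem.Int.mod ((i : Nat) : Int) 2 = ((i % 2 : Nat) : Int) := by
    rw [PySem.Int.mod_eq_emod_of_pos (by norm_num)]; omega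
  have e8 : PySem.Int.mod ((i : Nat) : Int) 8 = ((i % 8 : Nat) : Int) := by
    rw [PySem.Int.mod_eq_emod_of_pos (by norm_num)]; omega
  unfold pvF2
  rw [e, e2, e8, h2, PySem.List.pyGetD_natCast]
  generalize i % 8 = r at *
  interval_cases r <;> norm_num

lemma pvG3 (i : Nat) : PySem.List.pyGetD [3, 3, 1, 1, 2, 2, 4, 4, 5, 5] (PySem.Int.mod (PySem.Int.mod ((i : Nat) : Int) 40) 10) 0 = pvF3 (i : Int) := by
  have h : i % 10 < 10 := Nat.mod_lt _ (by norm_num)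
  have e : PySem.Int.mod (PySem.Int.mod ((i : Nat) : Int) 40) 10 = ((i % 10 : Nat) : Int) := by
    rw [PySem.Int.mod_eq_emod_of_pos (b := 40) (by norm_num), PySem.Int.mod_eq_emod_of_pos (by norm_num)]
    omega
  have e10 : PySem.Int.mod ((i : Nat) : Int) 10 = ((i % 10 : Nat) : Int) := by
    rw [PySem.Int.mod_eq_emod_of_pos (by norm_num)]; omega
  unfold pvF3
  rw [e, e10, PySem.List.pyGetD_natCast]
  generalize i % 10 = r at *
  interval_cases r <;> norm_num

-- the combined step function that A's fourth loop computes (after the stu lists are known)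
def pvStepA (s : Int × Int × Int) (p : Int × Int) : Int × Int × Int :=
  (if p.2 = pvF1 p.1 then s.1 + 1 else s.1,
   if p.2 = pvF2 p.1 then s.2.1 + 1 else s.2.1,
   if p.2 = pvF3 p.1 then s.2.2 + 1 else s.2.2)

-- A's score loop over range(n) with the prebuilt stu lists = the fold of pvStepA over enumerate
lemma scoresA_eq (answers : List Int) :
    (PySem.List.pyRange 0 (answers.length : Int) 1).foldl (fun (s : Int × Int × Int) i =>
      (if PySem.List.pyGetD answers i 0 = PySem.List.pyGetD ((PySem.List.pyRange 0 (answers.length : Int) 1).map pvF1) i 0 then s.1 + 1 else s.1,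
       if PySem.List.pyGetD answers i 0 = PySem.List.pyGetD ((PySem.List.pyRange 0 (answers.length : Int) 1).map pvF2) i 0 then s.2.1 + 1 else s.2.1,
       if PySem.List.pyGetD answers i 0 = PySem.List.pyGetD ((PySem.List.pyRange 0 (answers.length : Int) 1).map pvF3) i 0 then s.2.2 + 1 else s.2.2))
      (0, 0, 0)
    = (PySem.List.enumerate answers 0).foldl pvStepA (0, 0, 0) := by
  have step1 : (PySem.List.pyRange 0 (answers.length : Int) 1).foldl (fun (s : Int × Int × Int) i =>
      (if PySem.List.pyGetD answers i 0 = PySem.List.pyGetD ((PySem.List.pyRange 0 (answers.length : Int) 1).map pvF1) i 0 then s.1 + 1 else s.1,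
       if PySem.List.pyGetD answers i 0 = PySem.List.pyGetD ((PySem.List.pyRange 0 (answers.length : Int) 1).map pvF2) i 0 then s.2.1 + 1 else s.2.1,
       if PySem.List.pyGetD answers i 0 = PySem.List.pyGetD ((PySem.List.pyRange 0 (answers.length : Int) 1).map pvF3) i 0 then s.2.2 + 1 else s.2.2))
      (0, 0, 0)
      = (PySem.List.pyRange 0 (answers.length : Int) 1).foldl
          (fun s i => pvStepA s (i, PySem.List.pyGetD answers i 0)) (0, 0, 0) := by
    apply PySem.List.foldl_congr_mem
    intro acc x hx
    rw [PySem.List.mem_pyRange_one] at hx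
    rw [PySem.List.pyGetD_map_pyRange_of_nonneg _ _ _ _ hx.1 hx.2,
        PySem.List.pyGetD_map_pyRange_of_nonneg _ _ _ _ hx.1 hx.2,
        PySem.List.pyGetD_map_pyRange_of_nonneg _ _ _ _ hx.1 hx.2]
    rfl
  rw [step1, ← List.foldl_map (f := fun j => (j, PySem.List.pyGetD answers j 0)) (g := pvStepA)]
  rw [show ((answers.length : Int)) = PySem.List.len answers from (PySem.List.len_eq answers).symm,
      ← PySem.List.enumerate_eq_map_pyRange (d := 0)]

-- a fold of pvStepA is the triple of match counts
lemma stepA_split (l : List (Int × Int)) :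
    l.foldl pvStepA (0, 0, 0) =
      ((l.countP (fun p => decide (p.2 = pvF1 p.1)) : Int),
       (l.countP (fun p => decide (p.2 = pvF2 p.1)) : Int),
       (l.countP (fun p => decide (p.2 = pvF3 p.1)) : Int)) := by
  unfold pvStepA
  rw [PySem.List.foldl_prod_mk
        (f := fun (a : Int) (p : Int × Int) => if p.2 = pvF1 p.1 then a + 1 else a)
        (g := fun (s : Int × Int) (p : Int × Int) =>
          (if p.2 = pvF2 p.1 then s.1 + 1 else s.1,
           if p.2 = pvF3 p.1 then s.2 + 1 else s.2)),
      PySem.List.foldl_prod_mk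
        (f := fun (a : Int) (p : Int × Int) => if p.2 = pvF2 p.1 then a + 1 else a)
        (g := fun (a : Int) (p : Int × Int) => if p.2 = pvF3 p.1 then a + 1 else a),
      PySem.List.foldl_ite_add_one, PySem.List.foldl_ite_add_one, PySem.List.foldl_ite_add_one]
  simp

-- indicator sum over a Nodup list containing x.1
lemma sumInd (g : Int → Int) (x : Int × Int) (L : List Int) (hN : L.Nodup) (hx : x.1 ∈ L) :
    (L.map (fun r => if x == (r, g r) then (1 : Int) else 0)).sum
      = if x.2 == g x.1 then (1 : Int) else 0 := by
  induction L with
  | nil => cases hx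
  | cons r L' ih =>
    obtain ⟨x1, x2⟩ := x
    simp only [List.map_cons, List.sum_cons]
    rcases List.mem_cons.mp hx with h | h
    · subst h
      have hrest : (L'.map (fun r => if (x1, x2) == (r, g r) then (1 : Int) else 0)).sum = 0 := by
        apply List.sum_eq_zero
        intro y hy
        obtain ⟨r', hr', rfl⟩ := List.mem_map.mp hy
        have : r' ≠ x1 := fun h' => (List.nodup_cons.mp hN).1 (h' ▸ hr')
        simp [Prod.ext_iff, Ne.symm this]
      rw [hrest]
      simp [Prod.ext_iff]
    · have hr : r ≠ x1 := fun h' => (List.nodup_cons.mp hN).1 (h' ▸ h)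
      rw [ih (List.nodup_cons.mp hN).2 h]
      simp [Prod.ext_iff, Ne.symm hr]

-- summing per-residue counts over a covering Nodup residue list = one countP
lemma sumCount (g : Int → Int) (K : List (Int × Int)) (L : List Int) (hN : L.Nodup)
    (hK : ∀ x ∈ K, x.1 ∈ L) :
    (L.map (fun r => (K.count (r, g r) : Int))).sum
      = (K.countP (fun x => x.2 == g x.1) : Int) := by
  induction K with
  | nil => simp
  | cons x K' ih =>
    have h1 : (L.map (fun r => ((x :: K').count (r, g r) : Int))).sum
        = (L.map (fun r => (K'.count (r, g r) : Int) + (if x == (r, g r) then (1 : Int) else 0))).sum := by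
      congr 1
      apply List.map_congr_left
      intro r _
      rw [List.count_cons]
      push_cast
      split_ifs <;> simp
    rw [h1, PySem.List.sum_map_add_int, ih (fun y hy => hK y (List.mem_cons_of_mem _ hy)),
        sumInd g x L hN (hK x (List.mem_cons_self)), List.countP_cons]
    push_cast
    split_ifs <;> simp
  
-- B's counter, read back: the multiset count of (index mod 40, answer) pairs
lemma cntB (answers : List Int) (v : Int × Int) :
    ((PySem.List.enumerate answers 0).foldl (fun d x => d.insert (PySem.Int.mod x.1 40, x.2) (d.getD (PySem.Int.mod x.1 40, x.2) 0 + 1))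
      (PySem.Dict.empty : PySem.Dict (Int × Int) Int)).getD v 0
    = (((PySem.List.enumerate answers 0).map (fun x => (PySem.Int.mod x.1 40, x.2))).count v : Int) := by
  rw [← List.foldl_map (f := fun x : Int × Int => (PySem.Int.mod x.1 40, x.2))
        (g := fun (d : PySem.Dict (Int × Int) Int) k => d.insert k (d.getD k 0 + 1)),
      PySem.Dict.getD_foldl_insert_add_one]
  simp [PySem.Dict.empty, PySem.Dict.getD, PySem.Dict.get?]

-- B's table-read score for a lookup g agreeing with A's branch chain f on reduced residues
lemma scoreB_gen (answers : List Int) (g : Int → Int) (f : Int → Int)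
    (hgf : ∀ k : Nat, g (PySem.Int.mod ((k : Nat) : Int) 40) = f ((k : Nat) : Int)) :
    ((PySem.List.pyRange 0 40 1).map (fun r =>
      ((PySem.List.enumerate answers 0).foldl (fun d x => d.insert (PySem.Int.mod x.1 40, x.2) (d.getD (PySem.Int.mod x.1 40, x.2) 0 + 1))
        (PySem.Dict.empty : PySem.Dict (Int × Int) Int)).getD (r, g r) 0)).sum
    = ((PySem.List.enumerate answers 0).countP (fun p => decide (p.2 = f p.1)) : Int) := by
  rw [List.map_congr_left (fun r _ => cntB answers (r, g r))]
  rw [sumCount g _ _ (by decide) ?side]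
  case side =>
    intro x hx
    obtain ⟨y, hy, rfl⟩ := List.mem_map.mp hx
    rw [PySem.List.mem_pyRange_one]
    exact ⟨PySem.Int.mod_nonneg _ (by norm_num), PySem.Int.mod_lt _ (by norm_num)⟩
  rw [List.countP_map]
  congr 1
  apply List.countP_congr
  intro x hx
  obtain ⟨k, hk, rfl⟩ := (PySem.List.mem_enumerate_iff _ _ _).mp hx
  simp only [Function.comp, beq_iff_eq, decide_eq_true_eq]
  rw [show ((0 : Int) + (k : Int)) = ((k : Nat) : Int) by omega]
  rw [hgf k]

-- the final max/append stage of A = the filter/map stage of B, for any m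
lemma tail_eq (a b c m : Int) :
    (if a = m then [(1 : Int)] else []) ++ (if b = m then [2] else []) ++ (if c = m then [3] else [])
    = ((PySem.List.pyRange 0 3 1).filter (fun s => PySem.List.pyGetD [a, b, c] s 0 == m)).map (fun s => s + 1) := by
  have hR : PySem.List.pyRange 0 3 1 = [0, 1, 2] := by decide
  rw [hR]
  by_cases e1 : a = m <;> by_cases e2 : b = m <;> by_cases e3 : c = m <;>
    simp [List.filter_nil, PySem.List.pyGetD, e1, e2, e3]

-- ===== VERDICT (by name: the statement is the Claim_ definition above) =====
theorem solution_spec : Claim_equal_solution := by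
  intro answers _
  unfold Spec_solution solution solution_alt
  simp only [PySem.List.foldl_append_singleton_eq_map, List.nil_append]
  rw [scoresA_eq, stepA_split]
  simp only [pvPats, List.map_cons, List.map_nil, List.length_cons, List.length_nil]
  rw [scoreB_gen answers _ pvF1 pvG1, scoreB_gen answers _ pvF2 pvG2, scoreB_gen answers _ pvF3 pvG3]
  exact tail_eq _ _ _ _
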